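-- pv_equiv track=rewrite | github.com/pintoXD/fuec_ecc_codes | fuec_encoder_decoder.py | _min_r_required
-- ===== SOURCE A (Python) =====
-- def _min_r_required(E_plus_count: int) -> int:
--     # Need at least 1 (zero syndrome) + |E_plus| distinct syndromes
--     need = 1 + max(0, E_plus_count)
--     r = 0
--     cap = 1
--     while cap < need:
--         r += 1
--         cap <<= 1
--     return r
-- ===== SOURCE B (Python) =====
-- def _min_r_required(E_plus_count: int) -> int:
--     # smallest r with 2**r >= 1 + max(0, E_plus_count), closed form:
--     # ceil(log2(m+1)) == m.bit_length() for m >= 0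
--     return max(0, E_plus_count).bit_length()
-- ===== Notes on version B (the rewrite author's own statement) =====
-- stated objective: idiomatic
-- what changed: Replaces the doubling while-loop with the closed-form bit-length computation max(0, E_plus_count).bit_length(), using ceil(log2(m+1)) = m.bit_length().
import Mathlib
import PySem

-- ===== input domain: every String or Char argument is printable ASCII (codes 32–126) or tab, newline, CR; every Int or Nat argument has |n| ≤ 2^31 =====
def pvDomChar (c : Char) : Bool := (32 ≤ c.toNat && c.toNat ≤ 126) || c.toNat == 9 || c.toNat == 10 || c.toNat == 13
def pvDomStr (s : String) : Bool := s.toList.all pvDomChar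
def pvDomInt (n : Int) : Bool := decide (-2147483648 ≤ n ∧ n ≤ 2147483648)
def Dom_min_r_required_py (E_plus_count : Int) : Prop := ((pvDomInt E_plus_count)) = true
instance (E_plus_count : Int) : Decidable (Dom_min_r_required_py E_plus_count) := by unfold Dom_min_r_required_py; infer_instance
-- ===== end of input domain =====

-- B replaces A's doubling while-loop by the closed-form bit-length (Nat.size) of max 0 E_plus_count (idiomatic closed form).


-- ===== PORT A =====
-- the while-loop: while cap < need: r += 1; cap <<= 1.  0 < cap is the loop invariant (cap starts at 1) used for termination.
def minRLoop (need r cap : Int) (hcap : 0 < cap) : Int :=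
  if cap < need then minRLoop need (r + 1) (cap * 2) (by omega) else r
termination_by (need - cap).toNat
decreasing_by omega

def min_r_required_py (E_plus_count : Int) : Int :=
  minRLoop (1 + max 0 E_plus_count) 0 1 (by norm_num)

-- ===== PORT B =====
-- max(0, E_plus_count).bit_length() ; bit_length of a nonnegative int is Nat.size
def min_r_required_py_alt (E_plus_count : Int) : Int :=
  ((max 0 E_plus_count).toNat.size : Int)

-- ===== PRECONDITION & SPEC =====
def Spec_min_r_required_py (E_plus_count : Int) (out : Int) : Prop := out = min_r_required_py_alt E_plus_count
instance (E_plus_count : Int) (out : Int) : Decidable (Spec_min_r_required_py E_plus_count out) := by unfold Spec_min_r_required_py; infer_instance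

-- ===== CLAIM (what is proved, stated in full; the proofs are below) =====
def Claim_equal_min_r_required_py : Prop := ∀ (E_plus_count : Int), Dom_min_r_required_py E_plus_count → Spec_min_r_required_py E_plus_count (min_r_required_py E_plus_count)

-- ===== LEMMAS AND PROOFS =====

theorem size_eq_size_div_two_add_one (n : ℕ) (hn : n ≠ 0) : n.size = (n / 2).size + 1 := by
  conv_lhs => rw [← Nat.bit_testBit_zero_shiftRight_one n]
  rw [Nat.size_bit (by rwa [Nat.bit_testBit_zero_shiftRight_one])]
  simp [Nat.shiftRight_one]

theorem quot_toNat_zero_of_le (need cap : Int) (hcap : 0 < cap) (h : ¬ cap < need) :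
    ((need - 1) / cap).toNat = 0 := by
  have hq : (need - 1) / cap < 1 := by
    rw [Int.ediv_lt_iff_lt_mul hcap]; omega
  omega

theorem minRLoop_eq (n : ℕ) : ∀ (need r cap : Int) (hcap : 0 < cap), (need - cap).toNat ≤ n →
    minRLoop need r cap hcap = r + (((need - 1) / cap).toNat.size : Int) := by
  induction n with
  | zero =>
    intro need r cap hcap hle
    rw [minRLoop]
    split_ifs with h
    · omega
    · rw [quot_toNat_zero_of_le need cap hcap h]; simp
  | succ n ih =>
    intro need r cap hcap hle
    rw [minRLoop]
    split_ifs with h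
    · rw [ih need (r + 1) (cap * 2) (by omega) (by omega)]
      have hdd : (need - 1) / (cap * 2) = ((need - 1) / cap) / 2 := by
        rw [Int.ediv_ediv_of_nonneg (le_of_lt hcap)]
      have hq1 : (1:Int) ≤ (need - 1) / cap := by
        rw [Int.le_ediv_iff_mul_le hcap]; omega
      have htn : (((need - 1) / cap) / 2).toNat = ((need - 1) / cap).toNat / 2 := by omega
      rw [hdd, htn, size_eq_size_div_two_add_one ((need - 1) / cap).toNat (by omega)]
      push_cast
      ring
    · rw [quot_toNat_zero_of_le need cap hcap h]; simp

-- ===== VERDICT (by name: the statement is the Claim_ definition above) =====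
theorem min_r_required_py_spec : Claim_equal_min_r_required_py := by
  intro E _
  unfold Spec_min_r_required_py min_r_required_py min_r_required_py_alt
  rw [minRLoop_eq (1 + max 0 E - 1).toNat _ _ _ _ (by omega)]
  norm_num
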